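-- pv_equiv track=rewrite | github.com/isofinly/evrz-hackathon | parsers/py_parser.py | strip_function_bodies
-- ===== SOURCE A (Python) =====
-- def strip_function_bodies(py_lines: list[str]) -> str:
--     """
--     Returns a string with Python code without function bodies
--     """
--     key_constructions = ['def', 'class', 'import', 'from']
--     result = []
--     open_parentheses = 0
--     current_declaration = []
--     for line in py_lines:
--
--         if any(construction in line for construction in key_constructions):
--             current_declaration = [line.rstrip()]
--             open_parentheses = line.count('(') - line.count(')')
--
--             if open_parentheses == 0:
--                 result.extend(current_declaration)
--                 current_declaration = []
--             continue
--
--         if open_parentheses > 0: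
--             current_declaration.append(line.rstrip())
--             open_parentheses += line.count('(') - line.count(')')
--
--             if open_parentheses == 0:
--                 result.extend(current_declaration)
--                 current_declaration = []
--
--     return '\n'.join(result)
-- ===== SOURCE B (Python) =====
-- def strip_function_bodies(py_lines: list[str]) -> str:
--     """
--     Returns a string with Python code without function bodies
--     """
--     key_constructions = ['def', 'class', 'import', 'from']
--     out = []
--     i, n = 0, len(py_lines)
--     while i < n:
--         line = py_lines[i]
--         if any(k in line for k in key_constructions):
--             paren = line.count('(') - line.count(')')
--             buf = [line.rstrip()]
--             i += 1
--             if paren == 0: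
--                 out.append(buf[0])
--             elif paren > 0:
--                 # collect continuation lines until balanced, or abandon on a
--                 # new key-construction line (reprocessed by the outer loop)
--                 while i < n:
--                     cont = py_lines[i]
--                     if any(k in cont for k in key_constructions):
--                         break
--                     buf.append(cont.rstrip())
--                     paren += cont.count('(') - cont.count(')')
--                     i += 1
--                     if paren <= 0:
--                         if paren == 0:
--                             out.extend(buf)
--                         break
--         else:
--             i += 1
--     return '\n'.join(out)
-- ===== Notes on version B (the rewrite author's own statement) =====
-- stated objective: alternative
-- what changed: Replaced A's single for-loop threading result/open_parentheses/current_declaration state across all lines with an index-advancing outer scan plus a dedicated inner loop that collects one multi-line declaration at a time and hands interrupting key-construction lines back to the outer loop.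
import Mathlib
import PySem

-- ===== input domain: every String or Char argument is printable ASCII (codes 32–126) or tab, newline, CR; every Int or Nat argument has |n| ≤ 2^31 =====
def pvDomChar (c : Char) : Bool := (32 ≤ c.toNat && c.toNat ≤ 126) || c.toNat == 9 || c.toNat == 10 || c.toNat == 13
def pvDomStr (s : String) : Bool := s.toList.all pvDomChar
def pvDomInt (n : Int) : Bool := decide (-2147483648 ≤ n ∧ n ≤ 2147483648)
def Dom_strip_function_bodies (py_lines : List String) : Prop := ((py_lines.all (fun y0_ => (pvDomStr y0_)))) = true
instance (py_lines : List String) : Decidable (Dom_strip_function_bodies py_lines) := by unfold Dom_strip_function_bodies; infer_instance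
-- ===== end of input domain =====

-- B replaces A's single stateful for-loop (result/open_parentheses/current_declaration
-- threaded through every line) by an index-style outer scan with a dedicated inner loop
-- that collects one multi-line declaration at a time; same cost, different decomposition.

-- ===== PORT A =====
-- 'any(construction in line for construction in key_constructions)'
def pvIsKey (line : String) : Bool :=
  ["def", "class", "import", "from"].any (fun k => PySem.Str.isIn k line)

-- "line.count('(') - line.count(')')"
def pvCnt (line : String) : Int :=
  (PySem.Str.count line "(" : Int) - (PySem.Str.count line ")" : Int)

-- one iteration of A's for-loop over state (result, open_parentheses, current_declaration)
def pvAStep (st : List String × Int × List String) (line : String) :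
    List String × Int × List String :=
  let (result, open_p, decl) := st
  if pvIsKey line then
    let decl' := [PySem.Str.rstrip line]
    let op := pvCnt line
    if op = 0 then (result ++ decl', op, []) else (result, op, decl')
  else if open_p > 0 then
    let decl' := decl ++ [PySem.Str.rstrip line]
    let op := open_p + pvCnt line
    if op = 0 then (result ++ decl', op, []) else (result, op, decl')
  else st

def strip_function_bodies (py_lines : List String) : String :=
  PySem.Str.join "\n" (py_lines.foldl pvAStep ([], 0, [])).1

-- ===== PORT B =====
-- B's outer while loop (index i advancing = recursion on the remaining suffix) and its
-- inner continuation-collecting while loop; the inner loop hands an interrupting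
-- key-construction line back to the outer loop unconsumed.
mutual
def pvOuter : List String → List String
  | [] => []
  | line :: rest =>
    if pvIsKey line then
      let paren := pvCnt line
      if paren = 0 then PySem.Str.rstrip line :: pvOuter rest
      else if paren > 0 then pvInner rest [PySem.Str.rstrip line] paren
      else pvOuter rest
    else pvOuter rest
  termination_by l => (l.length, 0)

def pvInner : List String → List String → Int → List String
  | [], _, _ => []
  | cont :: rest, buf, paren =>
    if pvIsKey cont then pvOuter (cont :: rest)
    else
      let buf' := buf ++ [PySem.Str.rstrip cont]
      let paren' := paren + pvCnt cont
      if paren' = 0 then buf' ++ pvOuter rest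
      else if paren' > 0 then pvInner rest buf' paren'
      else pvOuter rest
  termination_by l _ _ => (l.length, 1)
end

def strip_function_bodies_alt (py_lines : List String) : String :=
  PySem.Str.join "\n" (pvOuter py_lines)

-- ===== PRECONDITION & SPEC =====
def Spec_strip_function_bodies (py_lines : List String) (out : String) : Prop := out = strip_function_bodies_alt py_lines
instance (py_lines : List String) (out : String) : Decidable (Spec_strip_function_bodies py_lines out) := by unfold Spec_strip_function_bodies; infer_instance

-- ===== CLAIM (what is proved, stated in full; the proofs are below) =====
def Claim_equal_strip_function_bodies : Prop := ∀ (py_lines : List String), Dom_strip_function_bodies py_lines → Spec_strip_function_bodies py_lines (strip_function_bodies py_lines)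

-- ===== LEMMAS AND PROOFS =====

-- Invariant linking A's fold state to B's two loops: with no open declaration (paren ≤ 0)
-- the fold emits res ++ outer-loop output; with an open declaration (paren > 0, buffer buf)
-- it emits res ++ inner-loop output.
lemma pv_fold_eq (lines : List String) :
    (∀ res paren decl, paren ≤ 0 →
        (lines.foldl pvAStep (res, paren, decl)).1 = res ++ pvOuter lines)
    ∧ (∀ res paren buf, 0 < paren →
        (lines.foldl pvAStep (res, paren, buf)).1 = res ++ pvInner lines buf paren) := by
  induction lines with
  | nil => exact ⟨fun res _ _ _ => by simp [pvOuter], fun res _ _ _ => by simp [pvInner]⟩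
  | cons l rest ih =>
    obtain ⟨ih1, ih2⟩ := ih
    have step_key : ∀ res (decl : List String), pvIsKey l = true →
        (rest.foldl pvAStep (pvAStep (res, 0, decl) l)).1 = res ++ pvOuter (l :: rest) := by
      intro res decl hk
      rw [pvOuter]
      simp only [pvAStep, hk, if_true]
      by_cases h0 : pvCnt l = 0
      · simp only [h0, if_true]
        rw [ih1 _ 0 _ le_rfl]; simp
      · simp only [h0, if_false]
        by_cases hp : pvCnt l > 0
        · simp only [hp, if_true]
          exact ih2 _ _ _ hp
        · simp only [hp, if_false]
          exact ih1 _ _ _ (by omega)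
    have step_key' : ∀ res paren (decl : List String), pvIsKey l = true →
        (rest.foldl pvAStep (pvAStep (res, paren, decl) l)).1 = res ++ pvOuter (l :: rest) := by
      intro res paren decl hk
      have : pvAStep (res, paren, decl) l = pvAStep (res, 0, decl) l := by
        simp [pvAStep, hk]
      rw [this]; exact step_key res decl hk
    constructor
    · intro res paren decl hle
      by_cases hk : pvIsKey l = true
      · rw [List.foldl_cons]; exact step_key' res paren decl hk
      · simp only [Bool.not_eq_true] at hk
        rw [List.foldl_cons]
        have hst : pvAStep (res, paren, decl) l = (res, paren, decl) := by
          simp [pvAStep, hk]; omega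
        rw [hst, ih1 _ _ _ hle, pvOuter]
        simp [hk]
    · intro res paren buf hgt
      rw [pvInner, List.foldl_cons]
      by_cases hk : pvIsKey l = true
      · simp only [hk, if_true]
        exact step_key' res paren buf hk
      · simp only [Bool.not_eq_true] at hk
        simp only [hk, Bool.false_eq_true, if_false]
        have hst : pvAStep (res, paren, buf) l =
            (if paren + pvCnt l = 0 then (res ++ (buf ++ [PySem.Str.rstrip l]), paren + pvCnt l, ([] : List String))
             else (res, paren + pvCnt l, buf ++ [PySem.Str.rstrip l])) := by
          simp [pvAStep, hk, hgt]
        rw [hst]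
        by_cases h0 : paren + pvCnt l = 0
        · simp only [h0, if_true]
          rw [ih1 _ 0 _ le_rfl]; simp
        · simp only [h0, if_false]
          by_cases hp : paren + pvCnt l > 0
          · simp only [hp, if_true]
            exact ih2 _ _ _ hp
          · simp only [hp, if_false]
            exact ih1 _ _ _ (by omega)

-- ===== VERDICT (by name: the statement is the Claim_ definition above) =====
theorem strip_function_bodies_spec : Claim_equal_strip_function_bodies := by
  intro py_lines _
  unfold Spec_strip_function_bodies strip_function_bodies strip_function_bodies_alt
  rw [(pv_fold_eq py_lines).1 [] 0 [] le_rfl]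
  simp
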